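-- pv_equiv track=rewrite | github.com/bartsidee/nl-housing-explorer | components/map_viewer.py | get_indicator_interpretation
-- ===== SOURCE A (Python) =====
-- INDICATOR_COLORSCHEMES = {
--     # POSITIVE: Higher = Better (Blue scale)
--     'positive': {
--         'colorscheme': 'YlGnBu',
--         'indicators': [
--             'ses_overall', 'ses_welvaart', 'ses_inkomen', 'ses_onderwijs',
--             'g_ink_pi', 'g_wozbag', 'p_arb_pp', 'p_ink_hi', 'p_koopw',
--             'pct_children', 'pct_families', 'g_hhgro',
--             'area_per_person_m2', 'pct_water',
--             # NEW: Groen percentage (higher = greener = better)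
--             'groen_percentage',
--             # NEW: Custom score (higher = better)
--             'custom_score',
--         ]
--     },
--     # NEGATIVE: Lower = Better (Green-Red scale reversed, green=low=good)
--     'negative': {
--         'colorscheme': 'RdYlGn_r',  # _r = reversed! Groen=laag, Rood=hoog
--         'indicators': [
--             'g_afs_hp', 'g_afs_gs', 'g_afs_sc', 'g_afs_kv',
--             # Transport & Bereikbaarheid: lager = beter (dichtbij = goed)
--             'g_afs_trein', 'g_afs_overstap', 'g_afs_oprit', 'g_afs_bieb',
--             'p_ink_li', 'bev_dich',
--             # Veiligheid: lager = beter (minder misdrijven/inbraak = beter)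
--             'crime_rate', 'inbraak_rate'
--         ]
--     },
--     # NEUTRAL: No value judgment (Purple scale)
--     'neutral': {
--         'colorscheme': 'BuPu',
--         'indicators': [
--             'a_opp_ha'
--         ]
--     },
--     # DIVERGING: Both high and low can be significant (terrain elevation)
--     'diverging': {
--         'colorscheme': 'RdYlBu',  # Red (high) - Yellow (medium) - Blue (low)
--         'indicators': [
--             'nap_hoogte_gem',  # NAP height: Blue=under zeeniveau, Red=heuvels
--         ]
--     }
-- }
--
-- def get_indicator_interpretation(indicator: str) -> str:
--     """
--     Get interpretation hint for indicator
--
--     Args: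
--         indicator: Indicator column name
--
--     Returns:
--         Interpretation string
--     """
--     for category, config in INDICATOR_COLORSCHEMES.items():
--         if indicator in config['indicators']:
--             if category == 'positive':
--                 return 'Blauw = hoger = beter'
--             elif category == 'negative':
--                 return 'Groen = lager = beter'
--             elif category == 'diverging':
--                 return 'Blauw = laag/onder zeeniveau | Rood = hoog/heuvels'
--             else:
--                 return 'Paars = neutraal'
--
--     return 'Blauw = hoger'
-- ===== SOURCE B (Python) =====
-- INTERPRETATION_BY_INDICATOR = {
--     ind: text
--     for inds, text in [
--         (['ses_overall', 'ses_welvaart', 'ses_inkomen', 'ses_onderwijs',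
--           'g_ink_pi', 'g_wozbag', 'p_arb_pp', 'p_ink_hi', 'p_koopw',
--           'pct_children', 'pct_families', 'g_hhgro',
--           'area_per_person_m2', 'pct_water', 'groen_percentage', 'custom_score'],
--          'Blauw = hoger = beter'),
--         (['g_afs_hp', 'g_afs_gs', 'g_afs_sc', 'g_afs_kv',
--           'g_afs_trein', 'g_afs_overstap', 'g_afs_oprit', 'g_afs_bieb',
--           'p_ink_li', 'bev_dich', 'crime_rate', 'inbraak_rate'],
--          'Groen = lager = beter'),
--         (['a_opp_ha'], 'Paars = neutraal'),
--         (['nap_hoogte_gem'], 'Blauw = laag/onder zeeniveau | Rood = hoog/heuvels'),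
--     ]
--     for ind in inds
-- }
--
-- def get_indicator_interpretation(indicator: str) -> str:
--     return INTERPRETATION_BY_INDICATOR.get(indicator, 'Blauw = hoger')
-- ===== Notes on version B (the rewrite author's own statement) =====
-- stated objective: idiomatic
-- what changed: Flattened the nested category structure once into a module-level dict mapping each indicator directly to its interpretation, so the function is a single dict .get with default instead of a scan over categories with an inner membership test and an if/elif branch on the category name.
import Mathlib
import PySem

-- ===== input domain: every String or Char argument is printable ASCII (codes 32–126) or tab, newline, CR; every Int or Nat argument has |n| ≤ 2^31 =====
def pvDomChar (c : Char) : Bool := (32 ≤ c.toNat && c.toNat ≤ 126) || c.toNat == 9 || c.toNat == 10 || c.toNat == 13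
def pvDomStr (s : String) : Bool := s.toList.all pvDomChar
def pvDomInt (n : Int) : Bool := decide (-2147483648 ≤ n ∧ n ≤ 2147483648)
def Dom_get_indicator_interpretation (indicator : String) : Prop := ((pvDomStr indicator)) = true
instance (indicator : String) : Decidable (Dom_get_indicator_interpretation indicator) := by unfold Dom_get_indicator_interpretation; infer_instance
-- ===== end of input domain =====

-- B flattens the nested category table once into a single indicator→interpretation dict, so the
-- function body is a single dict lookup with a default instead of a category scan with an inner
-- membership test and an if/elif on the category name (objective: idiomatic).


-- ===== PORT A =====
-- INDICATOR_COLORSCHEMES as a dict category → (colorscheme, indicators); only the parts A reads matter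
def pvIndicatorColorschemes : PySem.Dict String (String × List String) :=
  PySem.Dict.ofList
    [ ("positive", ("YlGnBu",
        ["ses_overall", "ses_welvaart", "ses_inkomen", "ses_onderwijs", "g_ink_pi", "g_wozbag",
         "p_arb_pp", "p_ink_hi", "p_koopw", "pct_children", "pct_families", "g_hhgro",
         "area_per_person_m2", "pct_water", "groen_percentage", "custom_score"])),
      ("negative", ("RdYlGn_r",
        ["g_afs_hp", "g_afs_gs", "g_afs_sc", "g_afs_kv", "g_afs_trein", "g_afs_overstap",
         "g_afs_oprit", "g_afs_bieb", "p_ink_li", "bev_dich", "crime_rate", "inbraak_rate"])),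
      ("neutral", ("BuPu", ["a_opp_ha"])),
      ("diverging", ("RdYlBu", ["nap_hoogte_gem"])) ]

-- the 'for category, config in …: if … return …' loop, first match wins
def pvLoopA (indicator : String) : List (String × (String × List String)) → String
  | [] => "Blauw = hoger"
  | (category, config) :: rest =>
    if config.2.contains indicator then
      if category = "positive" then "Blauw = hoger = beter"
      else if category = "negative" then "Groen = lager = beter"
      else if category = "diverging" then "Blauw = laag/onder zeeniveau | Rood = hoog/heuvels"
      else "Paars = neutraal"
    else pvLoopA indicator rest

def get_indicator_interpretation (indicator : String) : String :=
  pvLoopA indicator pvIndicatorColorschemes.items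

-- ===== PORT B =====
-- the flattened dict comprehension: each indicator mapped directly to its interpretation string
def pvInterpretationByIndicator : PySem.Dict String String :=
  PySem.Dict.ofList
    ((["ses_overall", "ses_welvaart", "ses_inkomen", "ses_onderwijs", "g_ink_pi", "g_wozbag",
       "p_arb_pp", "p_ink_hi", "p_koopw", "pct_children", "pct_families", "g_hhgro",
       "area_per_person_m2", "pct_water", "groen_percentage", "custom_score"].map
        (fun i => (i, "Blauw = hoger = beter"))) ++
     (["g_afs_hp", "g_afs_gs", "g_afs_sc", "g_afs_kv", "g_afs_trein", "g_afs_overstap",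
       "g_afs_oprit", "g_afs_bieb", "p_ink_li", "bev_dich", "crime_rate", "inbraak_rate"].map
        (fun i => (i, "Groen = lager = beter"))) ++
     ([("a_opp_ha", "Paars = neutraal"),
       ("nap_hoogte_gem", "Blauw = laag/onder zeeniveau | Rood = hoog/heuvels")]))

def get_indicator_interpretation_alt (indicator : String) : String :=
  pvInterpretationByIndicator.getD indicator "Blauw = hoger"

-- ===== PRECONDITION & SPEC =====
def Spec_get_indicator_interpretation (indicator : String) (out : String) : Prop := out = get_indicator_interpretation_alt indicator
instance (indicator : String) (out : String) : Decidable (Spec_get_indicator_interpretation indicator out) := by unfold Spec_get_indicator_interpretation; infer_instance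

-- ===== CLAIM (what is proved, stated in full; the proofs are below) =====
def Claim_equal_get_indicator_interpretation : Prop := ∀ (indicator : String), Dom_get_indicator_interpretation indicator → Spec_get_indicator_interpretation indicator (get_indicator_interpretation indicator)

-- ===== LEMMAS AND PROOFS =====

-- both dicts, built by Dict.ofList, evaluated to their literal item lists
theorem pvItemsA : pvIndicatorColorschemes.items =
    [ ("positive", ("YlGnBu",
        ["ses_overall", "ses_welvaart", "ses_inkomen", "ses_onderwijs", "g_ink_pi", "g_wozbag",
         "p_arb_pp", "p_ink_hi", "p_koopw", "pct_children", "pct_families", "g_hhgro",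
         "area_per_person_m2", "pct_water", "groen_percentage", "custom_score"])),
      ("negative", ("RdYlGn_r",
        ["g_afs_hp", "g_afs_gs", "g_afs_sc", "g_afs_kv", "g_afs_trein", "g_afs_overstap",
         "g_afs_oprit", "g_afs_bieb", "p_ink_li", "bev_dich", "crime_rate", "inbraak_rate"])),
      ("neutral", ("BuPu", ["a_opp_ha"])),
      ("diverging", ("RdYlBu", ["nap_hoogte_gem"])) ] := by rfl

set_option maxHeartbeats 1600000 in
theorem pvItemsB : pvInterpretationByIndicator =
    PySem.Dict.mk
      [("ses_overall", "Blauw = hoger = beter"), ("ses_welvaart", "Blauw = hoger = beter"),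
       ("ses_inkomen", "Blauw = hoger = beter"), ("ses_onderwijs", "Blauw = hoger = beter"),
       ("g_ink_pi", "Blauw = hoger = beter"), ("g_wozbag", "Blauw = hoger = beter"),
       ("p_arb_pp", "Blauw = hoger = beter"), ("p_ink_hi", "Blauw = hoger = beter"),
       ("p_koopw", "Blauw = hoger = beter"), ("pct_children", "Blauw = hoger = beter"),
       ("pct_families", "Blauw = hoger = beter"), ("g_hhgro", "Blauw = hoger = beter"),
       ("area_per_person_m2", "Blauw = hoger = beter"), ("pct_water", "Blauw = hoger = beter"),
       ("groen_percentage", "Blauw = hoger = beter"), ("custom_score", "Blauw = hoger = beter"),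
       ("g_afs_hp", "Groen = lager = beter"), ("g_afs_gs", "Groen = lager = beter"),
       ("g_afs_sc", "Groen = lager = beter"), ("g_afs_kv", "Groen = lager = beter"),
       ("g_afs_trein", "Groen = lager = beter"), ("g_afs_overstap", "Groen = lager = beter"),
       ("g_afs_oprit", "Groen = lager = beter"), ("g_afs_bieb", "Groen = lager = beter"),
       ("p_ink_li", "Groen = lager = beter"), ("bev_dich", "Groen = lager = beter"),
       ("crime_rate", "Groen = lager = beter"), ("inbraak_rate", "Groen = lager = beter"),
       ("a_opp_ha", "Paars = neutraal"),
       ("nap_hoogte_gem", "Blauw = laag/onder zeeniveau | Rood = hoog/heuvels")] := by rfl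

-- ===== VERDICT (by name: the statement is the Claim_ definition above) =====
-- all indicator names occurring in either table
def pvAllKeys : List String := ["ses_overall", "ses_welvaart", "ses_inkomen", "ses_onderwijs", "g_ink_pi", "g_wozbag", "p_arb_pp", "p_ink_hi", "p_koopw", "pct_children", "pct_families", "g_hhgro", "area_per_person_m2", "pct_water", "groen_percentage", "custom_score", "g_afs_hp", "g_afs_gs", "g_afs_sc", "g_afs_kv", "g_afs_trein", "g_afs_overstap", "g_afs_oprit", "g_afs_bieb", "p_ink_li", "bev_dich", "crime_rate", "inbraak_rate", "a_opp_ha", "nap_hoogte_gem"]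

set_option maxHeartbeats 4000000 in
theorem get_indicator_interpretation_spec : Claim_equal_get_indicator_interpretation := by
  intro s _
  unfold Spec_get_indicator_interpretation get_indicator_interpretation get_indicator_interpretation_alt
  rw [pvItemsA, pvItemsB]
  by_cases h : s ∈ pvAllKeys
  · fin_cases h <;> rfl
  · simp only [pvAllKeys, List.mem_cons, List.not_mem_nil, or_false, not_or] at h
    obtain ⟨h1, h2, h3, h4, h5, h6, h7, h8, h9, h10, h11, h12, h13, h14, h15, h16, h17, h18, h19, h20, h21, h22, h23, h24, h25, h26, h27, h28, h29, h30⟩ := h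
    have e1 : (s == "ses_overall") = false := by simp [h1]
    have f1 : ("ses_overall" == s) = false := by simp [Ne.symm h1]
    have e2 : (s == "ses_welvaart") = false := by simp [h2]
    have f2 : ("ses_welvaart" == s) = false := by simp [Ne.symm h2]
    have e3 : (s == "ses_inkomen") = false := by simp [h3]
    have f3 : ("ses_inkomen" == s) = false := by simp [Ne.symm h3]
    have e4 : (s == "ses_onderwijs") = false := by simp [h4]
    have f4 : ("ses_onderwijs" == s) = false := by simp [Ne.symm h4]
    have e5 : (s == "g_ink_pi") = false := by simp [h5]
    have f5 : ("g_ink_pi" == s) = false := by simp [Ne.symm h5]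
    have e6 : (s == "g_wozbag") = false := by simp [h6]
    have f6 : ("g_wozbag" == s) = false := by simp [Ne.symm h6]
    have e7 : (s == "p_arb_pp") = false := by simp [h7]
    have f7 : ("p_arb_pp" == s) = false := by simp [Ne.symm h7]
    have e8 : (s == "p_ink_hi") = false := by simp [h8]
    have f8 : ("p_ink_hi" == s) = false := by simp [Ne.symm h8]
    have e9 : (s == "p_koopw") = false := by simp [h9]
    have f9 : ("p_koopw" == s) = false := by simp [Ne.symm h9]
    have e10 : (s == "pct_children") = false := by simp [h10]
    have f10 : ("pct_children" == s) = false := by simp [Ne.symm h10]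
    have e11 : (s == "pct_families") = false := by simp [h11]
    have f11 : ("pct_families" == s) = false := by simp [Ne.symm h11]
    have e12 : (s == "g_hhgro") = false := by simp [h12]
    have f12 : ("g_hhgro" == s) = false := by simp [Ne.symm h12]
    have e13 : (s == "area_per_person_m2") = false := by simp [h13]
    have f13 : ("area_per_person_m2" == s) = false := by simp [Ne.symm h13]
    have e14 : (s == "pct_water") = false := by simp [h14]
    have f14 : ("pct_water" == s) = false := by simp [Ne.symm h14]
    have e15 : (s == "groen_percentage") = false := by simp [h15]
    have f15 : ("groen_percentage" == s) = false := by simp [Ne.symm h15]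
    have e16 : (s == "custom_score") = false := by simp [h16]
    have f16 : ("custom_score" == s) = false := by simp [Ne.symm h16]
    have e17 : (s == "g_afs_hp") = false := by simp [h17]
    have f17 : ("g_afs_hp" == s) = false := by simp [Ne.symm h17]
    have e18 : (s == "g_afs_gs") = false := by simp [h18]
    have f18 : ("g_afs_gs" == s) = false := by simp [Ne.symm h18]
    have e19 : (s == "g_afs_sc") = false := by simp [h19]
    have f19 : ("g_afs_sc" == s) = false := by simp [Ne.symm h19]
    have e20 : (s == "g_afs_kv") = false := by simp [h20]
    have f20 : ("g_afs_kv" == s) = false := by simp [Ne.symm h20]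
    have e21 : (s == "g_afs_trein") = false := by simp [h21]
    have f21 : ("g_afs_trein" == s) = false := by simp [Ne.symm h21]
    have e22 : (s == "g_afs_overstap") = false := by simp [h22]
    have f22 : ("g_afs_overstap" == s) = false := by simp [Ne.symm h22]
    have e23 : (s == "g_afs_oprit") = false := by simp [h23]
    have f23 : ("g_afs_oprit" == s) = false := by simp [Ne.symm h23]
    have e24 : (s == "g_afs_bieb") = false := by simp [h24]
    have f24 : ("g_afs_bieb" == s) = false := by simp [Ne.symm h24]
    have e25 : (s == "p_ink_li") = false := by simp [h25]
    have f25 : ("p_ink_li" == s) = false := by simp [Ne.symm h25]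
    have e26 : (s == "bev_dich") = false := by simp [h26]
    have f26 : ("bev_dich" == s) = false := by simp [Ne.symm h26]
    have e27 : (s == "crime_rate") = false := by simp [h27]
    have f27 : ("crime_rate" == s) = false := by simp [Ne.symm h27]
    have e28 : (s == "inbraak_rate") = false := by simp [h28]
    have f28 : ("inbraak_rate" == s) = false := by simp [Ne.symm h28]
    have e29 : (s == "a_opp_ha") = false := by simp [h29]
    have f29 : ("a_opp_ha" == s) = false := by simp [Ne.symm h29]
    have e30 : (s == "nap_hoogte_gem") = false := by simp [h30]
    have f30 : ("nap_hoogte_gem" == s) = false := by simp [Ne.symm h30]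
    simp only [pvLoopA, List.contains, List.elem, PySem.Dict.getD, PySem.Dict.get?_mk_cons,
      e1, e2, e3, e4, e5, e6, e7, e8, e9, e10, e11, e12, e13, e14, e15, e16, e17, e18, e19, e20, e21, e22, e23, e24, e25, e26, e27, e28, e29, e30, f1, f2, f3, f4, f5, f6, f7, f8, f9, f10, f11, f12, f13, f14, f15, f16, f17, f18, f19, f20, f21, f22, f23, f24, f25, f26, f27, f28, f29, f30]
    simp [PySem.Dict.get?]
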